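-- pv_equiv track=rewrite | github.com/nisbh/MORPH | ip_profiles.py | _primary_key
-- ===== SOURCE A (Python) =====
-- def _primary_key(breakdown: dict[str, int], preferred_order: list[str]) -> str:
--     """Pick a primary category from a count breakdown dict."""
--     if not breakdown:
--         return "unknown"
--
--     max_count = max(int(v) for v in breakdown.values())
--     candidates = {k for k, v in breakdown.items() if int(v) == max_count}
--
--     for key in preferred_order:
--         if key in candidates:
--             return key
--
--     return sorted(candidates)[0] if candidates else "unknown"
-- ===== SOURCE B (Python) =====
-- def _primary_key(breakdown: dict, preferred_order: list) -> str:
--     """Pick a primary category from a count breakdown dict."""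
--     if not breakdown:
--         return "unknown"
--     sentinel = len(preferred_order)
--     pos = {}
--     for i, key in enumerate(preferred_order):
--         pos.setdefault(key, i)
--     return min(breakdown, key=lambda k: (-int(breakdown[k]), pos.get(k, sentinel), k))
-- ===== Notes on version B (the rewrite author's own statement) =====
-- stated objective: simpler
-- what changed: Replaced A's multi-phase body (max pass, candidate-set comprehension, preferred-order scan, sorted-candidates fallback) with one dict pass recording each preferred key's first position and a single min() over the keys under the lexicographic key (-count, position or sentinel, key).
import Mathlib
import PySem

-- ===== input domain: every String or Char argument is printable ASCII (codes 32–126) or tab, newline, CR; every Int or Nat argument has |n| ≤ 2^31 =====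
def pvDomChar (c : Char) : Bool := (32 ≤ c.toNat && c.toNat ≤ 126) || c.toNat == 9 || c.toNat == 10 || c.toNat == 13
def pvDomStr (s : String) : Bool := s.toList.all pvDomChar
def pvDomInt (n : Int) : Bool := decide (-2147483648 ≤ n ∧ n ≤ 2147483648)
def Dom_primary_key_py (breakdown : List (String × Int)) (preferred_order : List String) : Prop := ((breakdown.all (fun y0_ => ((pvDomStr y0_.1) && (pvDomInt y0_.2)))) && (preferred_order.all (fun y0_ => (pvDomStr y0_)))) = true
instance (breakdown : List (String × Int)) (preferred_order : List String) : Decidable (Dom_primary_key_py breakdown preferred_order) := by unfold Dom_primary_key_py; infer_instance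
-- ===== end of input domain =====

-- B replaces A's multi-phase selection (max pass, candidate-set pass, preferred scan,
-- alphabetical fallback) by a single min() over the keys under the lexicographic key
-- (-count, preferred index or sentinel, key); objective: simpler (one selection, no candidate set).


-- ===== PORT A =====
-- the 'for key in preferred_order: if key in candidates: return key' loop
def pvFirstHit (candidates : PySem.Set String) : List String → Option String
  | [] => none
  | key :: rest => if candidates.contains key then some key else pvFirstHit candidates rest

def primary_key_py (breakdown : List (String × Int)) (preferred_order : List String) : String :=
  if breakdown = [] then "unknown"
  else
    match PySem.List.max? (breakdown.map (fun p => p.2)) (fun v => v) with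
    | none => "unknown"   -- unreachable: 'if not breakdown' already returned
    | some max_count =>
      let candidates : PySem.Set String :=
        PySem.Set.ofList ((breakdown.filter (fun p => p.2 = max_count)).map (fun p => p.1))
      match pvFirstHit candidates preferred_order with
      | some key => key
      | none =>
        match PySem.List.sorted candidates (fun x => x) false with
        | [] => "unknown"
        | c :: _ => c

-- ===== PORT B =====
-- Python compares tuples lexicographically; Mathlib's '<' on products is the pointwise
-- order, so the triple comparison is written out by hand (exact for Python's tuple '<')
def pvRankLt (x y : Int × Int × String) : Bool :=
  x.1 < y.1 || (x.1 = y.1 && (x.2.1 < y.2.1 || (x.2.1 = y.2.1 && x.2.2 < y.2.2)))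

-- 'pos = {}; for i, key in enumerate(preferred_order): pos.setdefault(key, i)'
def pvPosDict (preferred_order : List String) : PySem.Dict String Int :=
  (PySem.List.enumerate preferred_order 0).foldl
    (fun pos ik => pos.setdefault ik.2 ik.1) PySem.Dict.empty

-- the key lambda: (-int(breakdown[k]), pos.get(k, sentinel), k);
-- breakdown[k] is a first-match dict lookup, only ever applied to keys of breakdown (default unreachable)
def pvRank (breakdown : List (String × Int)) (pos : PySem.Dict String Int) (sentinel : Int)
    (k : String) : Int × Int × String :=
  (-(breakdown.lookup k).getD 0, pos.getD k sentinel, k)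

-- min(iterable, key=…): keep the first element whose key is strictly below the best so far
def pvMinFold (rank : String → Int × Int × String) : String → List String → String
  | best, [] => best
  | best, k :: rest => pvMinFold rank (if pvRankLt (rank k) (rank best) then k else best) rest

def primary_key_py_alt (breakdown : List (String × Int)) (preferred_order : List String) : String :=
  match breakdown with
  | [] => "unknown"
  | (k0, _) :: rest =>
    pvMinFold (pvRank breakdown (pvPosDict preferred_order) preferred_order.length) k0
      (rest.map (fun p => p.1))

-- ===== PRECONDITION & SPEC =====
-- The association list stands for a Python dict, whose keys are necessarily distinct; a list with
-- duplicate keys represents no dict at all, so it is excluded (A reads every pair, B looks keys up).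
def Pre_primary_key_py (breakdown : List (String × Int)) (preferred_order : List String) : Prop :=
  (breakdown.map (fun p => p.1)).Nodup
instance (breakdown : List (String × Int)) (preferred_order : List String) : Decidable (Pre_primary_key_py breakdown preferred_order) := by unfold Pre_primary_key_py; infer_instance
def pvWitness_primary_key_py : (List (String × Int)) × List String := ([("news", 2), ("sport", 2)], ["sport"])

def Spec_primary_key_py (breakdown : List (String × Int)) (preferred_order : List String) (out : String) : Prop := out = primary_key_py_alt breakdown preferred_order
instance (breakdown : List (String × Int)) (preferred_order : List String) (out : String) : Decidable (Spec_primary_key_py breakdown preferred_order out) := by unfold Spec_primary_key_py; infer_instance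

-- ===== CLAIM (what is proved, stated in full; the proofs are below) =====
def Claim_equal_primary_key_py : Prop := ∀ (breakdown : List (String × Int)) (preferred_order : List String), Dom_primary_key_py breakdown preferred_order → Pre_primary_key_py breakdown preferred_order → Spec_primary_key_py breakdown preferred_order (primary_key_py breakdown preferred_order)

-- ===== LEMMAS AND PROOFS =====

theorem pvRankLt_irrefl (x : Int × Int × String) : pvRankLt x x = false := by
  simp [pvRankLt]

theorem pvRankLt_trans {x y z : Int × Int × String} (h1 : pvRankLt x y = true)
    (h2 : pvRankLt y z = true) : pvRankLt x z = true := by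
  obtain ⟨a1, b1, c1⟩ := x; obtain ⟨a2, b2, c2⟩ := y; obtain ⟨a3, b3, c3⟩ := z
  simp only [pvRankLt] at *
  simp at h1 h2 ⊢
  rcases h1 with h1 | ⟨e1, h1⟩ <;> rcases h2 with h2 | ⟨e2, h2⟩
  · exact Or.inl (lt_trans h1 h2)
  · exact Or.inl (e2 ▸ h1)
  · exact Or.inl (e1 ▸ h2)
  · refine Or.inr ⟨e1.trans e2, ?_⟩
    rcases h1 with h1 | ⟨f1, h1⟩ <;> rcases h2 with h2 | ⟨f2, h2⟩
    · exact Or.inl (lt_trans h1 h2)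
    · exact Or.inl (f2 ▸ h1)
    · exact Or.inl (f1 ▸ h2)
    · exact Or.inr ⟨f1.trans f2, lt_trans h1 h2⟩

theorem pvRankLt_conn {x y : Int × Int × String} (h1 : pvRankLt x y = false)
    (h2 : pvRankLt y x = false) : x = y := by
  obtain ⟨a1, b1, c1⟩ := x; obtain ⟨a2, b2, c2⟩ := y
  simp only [pvRankLt] at *
  simp at h1 h2
  obtain ⟨ha1, h1⟩ := h1; obtain ⟨ha2, h2⟩ := h2
  have ea : a1 = a2 := le_antisymm ha2 ha1
  obtain ⟨hb1, h1⟩ := h1 ea; obtain ⟨hb2, h2⟩ := h2 ea.symm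
  have eb : b1 = b2 := le_antisymm hb2 hb1
  have ec : c1.toList = c2.toList := le_antisymm (h2 eb.symm) (h1 eb)
  have : c1 = c2 := String.toList_injective ec
  simp [ea, eb, this]

theorem pvRankLt_asymm {x y : Int × Int × String} (h : pvRankLt x y = true) :
    pvRankLt y x = false := by
  by_contra hc
  have := pvRankLt_trans h (by simpa using Bool.not_eq_false _ |>.mp hc)
  simp [pvRankLt_irrefl] at this

theorem pvRankLt_neg_trans {x y z : Int × Int × String} (h1 : pvRankLt x y = false)
    (h2 : pvRankLt y z = false) : pvRankLt x z = false := by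
  by_contra hc
  have hxz : pvRankLt x z = true := by simpa using Bool.not_eq_false _ |>.mp hc
  by_cases hyx : pvRankLt y x = true
  · have := pvRankLt_trans hyx hxz; simp [this] at h2
  · have exy : y = x := pvRankLt_conn (by simpa using hyx) h1
    rw [exy] at h2; simp [hxz] at h2

theorem pvMinFold_mem (rank : String → Int × Int × String) (a : String) (l : List String) :
    pvMinFold rank a l ∈ a :: l := by
  induction l generalizing a with
  | nil => simp [pvMinFold]
  | cons k t ih =>
    simp only [pvMinFold]
    split
    · have h := ih k; simp at h ⊢; tauto
    · have h := ih a; simp at h ⊢; tauto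

theorem pvMinFold_min (rank : String → Int × Int × String) (a : String) (l : List String) :
    ∀ y ∈ a :: l, pvRankLt (rank y) (rank (pvMinFold rank a l)) = false := by
  induction l generalizing a with
  | nil => intro y hy; simp at hy; simp [hy, pvMinFold, pvRankLt_irrefl]
  | cons k t ih =>
    intro y hy
    simp only [pvMinFold]
    by_cases hlt : pvRankLt (rank k) (rank a) = true
    · rw [if_pos hlt]
      have hab : pvRankLt (rank a) (rank k) = false := pvRankLt_asymm hlt
      have hmin := ih k
      rcases (by simpa using hy : y = a ∨ y = k ∨ y ∈ t) with rfl | rfl | hyt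
      · exact pvRankLt_neg_trans hab (hmin k (by simp))
      · exact hmin y (by simp)
      · exact hmin y (by simp [hyt])
    · rw [if_neg hlt]
      have hkb : pvRankLt (rank k) (rank a) = false := by simpa using hlt
      have hmin := ih a
      rcases (by simpa using hy : y = a ∨ y = k ∨ y ∈ t) with rfl | rfl | hyt
      · exact hmin y (by simp)
      · exact pvRankLt_neg_trans hkb (hmin a (by simp))
      · exact hmin y (by simp [hyt])

theorem pvLookup_of_mem {l : List (String × Int)} {k : String} {v : Int}
    (h : (k, v) ∈ l) (hn : (l.map (fun p => p.1)).Nodup) : l.lookup k = some v := by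
  induction l with
  | nil => simp at h
  | cons p t ih =>
    obtain ⟨k', v'⟩ := p
    simp only [List.map_cons, List.nodup_cons] at hn
    rcases (by simpa using h) with ⟨rfl, rfl⟩ | ht
    · simp [List.lookup]
    · have hk : k ≠ k' := by
        rintro rfl
        exact hn.1 (by exact List.mem_map.mpr ⟨(k, v), ht, rfl⟩)
      simp [List.lookup, beq_false_of_ne hk, ih ht hn.2]

-- index-or-sentinel: the value B's pos dict associates to y (proof-side characterisation)
def pvIdxD (po : List String) (y : String) : Int :=
  ((PySem.List.index? po y).map (fun n => (n : Int))).getD po.length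

theorem pvIdxD_nonneg (po : List String) (y : String) : 0 ≤ pvIdxD po y := by
  simp only [pvIdxD]
  cases PySem.List.index? po y <;> simp

theorem pvIdxD_cons_of_ne {p y : String} (po : List String) (h : p ≠ y) :
    pvIdxD (p :: po) y = pvIdxD po y + 1 := by
  simp only [pvIdxD, PySem.List.index?_cons_of_ne po h]
  cases PySem.List.index? po y <;> simp

theorem pvPos_get? (po : List String) (s : Int) (d : PySem.Dict String Int) (k : String) :
    ((PySem.List.enumerate po s).foldl (fun pos ik => pos.setdefault ik.2 ik.1) d).get? k
      = ((d.get? k).orElse (fun _ => (PySem.List.index? po k).map (fun i => s + (i : Int)))) := by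
  induction po generalizing s d with
  | nil =>
    rw [PySem.List.enumerate_nil]
    cases h : d.get? k <;> simp [h, Option.orElse]
  | cons x xs ih =>
    rw [PySem.List.enumerate_cons, List.foldl_cons, ih]
    by_cases hk : k = x
    · subst hk
      rw [PySem.Dict.get?_setdefault_self, PySem.List.index?_cons_self]
      cases h : d.get? k <;> simp [Option.orElse]
    · rw [PySem.Dict.get?_setdefault_of_ne _ _ hk, PySem.List.index?_cons_of_ne xs (fun e => hk e.symm)]
      cases h : d.get? k <;> cases h2 : PySem.List.index? xs k <;>
        simp [Option.orElse] <;> ring_nf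

theorem pvPosDict_getD (po : List String) (k : String) :
    (pvPosDict po).getD k (po.length : Int) = pvIdxD po k := by
  rw [PySem.Dict.getD_eq_get?_getD, pvPosDict, pvPos_get? po 0 PySem.Dict.empty k,
      PySem.Dict.get?_empty]
  simp only [pvIdxD, Option.orElse]
  cases h : PySem.List.index? po k <;> simp

theorem pvFirstHit_none {cand : PySem.Set String} {po : List String}
    (h : pvFirstHit cand po = none) : ∀ q ∈ po, q ∉ cand := by
  induction po with
  | nil => simp
  | cons p t ih =>
    simp only [pvFirstHit] at h
    split at h
    · simp at h
    · intro q hq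
      rcases (by simpa using hq) with rfl | hqt
      · simpa using ‹¬ cand.contains q = true›
      · exact ih h q hqt

theorem pvFirstHit_spec {cand : PySem.Set String} {po : List String} {k : String}
    (h : pvFirstHit cand po = some k) :
    k ∈ cand ∧ ∀ y ∈ cand, y ≠ k → pvIdxD po k < pvIdxD po y := by
  induction po with
  | nil => simp [pvFirstHit] at h
  | cons p t ih =>
    simp only [pvFirstHit] at h
    by_cases hc : cand.contains p = true
    · rw [if_pos hc] at h
      obtain rfl : p = k := by simpa using h
      refine ⟨by simpa using hc, ?_⟩
      intro y hy hne
      have h0 : pvIdxD (p :: t) p = 0 := by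
        simp only [pvIdxD]
        rw [PySem.List.index?_cons_self]
        rfl
      rw [h0, pvIdxD_cons_of_ne t (fun e => hne e.symm)]
      have := pvIdxD_nonneg t y
      omega
    · rw [if_neg hc] at h
      obtain ⟨hk, hmin⟩ := ih h
      have hpk : p ≠ k := by
        rintro rfl
        exact hc (by simpa using hk)
      refine ⟨hk, ?_⟩
      intro y hy hne
      have hpy : p ≠ y := by
        rintro rfl
        exact hc (by simpa using hy)
      rw [pvIdxD_cons_of_ne t hpk, pvIdxD_cons_of_ne t hpy]
      have := hmin y hy hne
      omega

-- ===== VERDICT (by name: the statement is the Claim_ definition above) =====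
theorem primary_key_py_spec : Claim_equal_primary_key_py := by
  intro breakdown po _hdom hpre
  unfold Spec_primary_key_py
  match breakdown, hpre with
  | [], _ => rfl
  | (k0, v0) :: rest, hpre =>
  set b : List (String × Int) := (k0, v0) :: rest with hb
  set r : String → Int × Int × String := pvRank b (pvPosDict po) po.length with hr
  set keys : List String := b.map (fun p => p.1) with hkeys
  -- B's side
  have haltdef : primary_key_py_alt b po = pvMinFold r k0 (rest.map (fun p => p.1)) := rfl
  set mB : String := pvMinFold r k0 (rest.map (fun p => p.1)) with hmB
  have hkeys' : keys = k0 :: rest.map (fun p => p.1) := by simp [hkeys, hb]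
  have hBmem : mB ∈ keys := by rw [hkeys']; exact pvMinFold_mem r k0 _
  have hBmin : ∀ y ∈ keys, pvRankLt (r y) (r mB) = false := by
    rw [hkeys']; exact pvMinFold_min r k0 _
  -- A's side: the max exists
  cases hM : PySem.List.max? (b.map (fun p => p.2)) (fun v => v) with
  | none =>
    exfalso
    rw [PySem.List.max?_eq_none_iff] at hM
    simp [hb] at hM
  | some M =>
  have hvmax : ∀ pr ∈ b, pr.2 ≤ M := by
    intro pr hpr
    exact PySem.List.max?_isMax hM pr.2 (List.mem_map.mpr ⟨pr, hpr, rfl⟩)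
  obtain ⟨pm, hpm, hpm2⟩ : ∃ pr ∈ b, pr.2 = M := by
    have := PySem.List.max?_mem hM
    simpa [List.mem_map] using this
  set cand : PySem.Set String :=
    PySem.Set.ofList ((b.filter (fun p => p.2 = M)).map (fun p => p.1)) with hcanddef
  have hcand : ∀ y, y ∈ cand ↔ (y, M) ∈ b := by
    intro y
    simp only [hcanddef, PySem.Set.mem_ofList, List.mem_map, List.mem_filter]
    constructor
    · rintro ⟨pr, ⟨hprb, hpr2⟩, rfl⟩
      have : pr = (pr.1, M) := by
        obtain ⟨x, z⟩ := pr; simp at hpr2 ⊢; exact hpr2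
      rwa [this] at hprb
    · intro hyb
      exact ⟨(y, M), ⟨hyb, by simp⟩, rfl⟩
  have hcsub : ∀ y ∈ cand, y ∈ keys := by
    intro y hy
    exact List.mem_map.mpr ⟨(y, M), (hcand y).mp hy, rfl⟩
  have hrank : ∀ y v, (y, v) ∈ b → r y = (-v, pvIdxD po y, y) := by
    intro y v hyv
    simp only [hr, pvRank, pvLookup_of_mem hyv hpre, Option.getD_some, pvPosDict_getD]
  -- minimality within the candidate set extends to all keys
  have hext : ∀ m, m ∈ cand → (∀ y ∈ cand, pvRankLt (r y) (r m) = false) →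
      ∀ y ∈ keys, pvRankLt (r y) (r m) = false := by
    intro m hm hcmin y hy
    obtain ⟨pr, hprb, rfl⟩ := List.mem_map.mp hy
    by_cases hv : pr.2 = M
    · refine hcmin pr.1 ((hcand pr.1).mpr ?_)
      have : pr = (pr.1, M) := by
        obtain ⟨x, z⟩ := pr; simp at hv ⊢; exact hv
      rwa [this] at hprb
    · have hvM : pr.2 < M := lt_of_le_of_ne (hvmax pr hprb) hv
      have hprb' : (pr.1, pr.2) ∈ b := by
        obtain ⟨x, z⟩ := pr; exact hprb
      rw [hrank pr.1 pr.2 hprb', hrank m M ((hcand m).mp hm)]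
      simp only [pvRankLt]
      simp
      constructor
      · omega
      · intro e; exfalso; omega
  -- reduce A to the three-phase expression
  have hbne : ¬ (b = []) := by simp [hb]
  cases hfh : pvFirstHit cand po with
  | some k =>
    have hAdef : primary_key_py b po = k := by
      simp only [primary_key_py, if_neg hbne, hM]
      rw [← hcanddef, hfh]
    obtain ⟨hkc, hkmin⟩ := pvFirstHit_spec hfh
    have hcmin : ∀ y ∈ cand, pvRankLt (r y) (r k) = false := by
      intro y hy
      by_cases hyk : y = k
      · rw [hyk]; exact pvRankLt_irrefl _
      · rw [hrank y M ((hcand y).mp hy), hrank k M ((hcand k).mp hkc)]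
        have hidx := hkmin y hy hyk
        simp only [pvRankLt]
        simp
        refine ⟨by omega, fun e => absurd e (by omega)⟩
    have hAmin := hext k hkc hcmin
    have e1 : pvRankLt (r k) (r mB) = false := hBmin k (hcsub k hkc)
    have e2 : pvRankLt (r mB) (r k) = false := hAmin mB hBmem
    have : r k = r mB := pvRankLt_conn e1 e2
    have : k = mB := by
      have h3 := congrArg (fun t => t.2.2) this
      simpa [hr, pvRank] using h3
    rw [hAdef, haltdef]; exact this
  | none =>
    cases hs : PySem.List.sorted cand (fun x => x) false with
    | nil =>
      exfalso
      rw [PySem.List.sorted_eq_nil_iff] at hs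
      have : pm.1 ∈ cand := by
        refine (hcand pm.1).mpr ?_
        have : pm = (pm.1, M) := by
          obtain ⟨x, z⟩ := pm; simp at hpm2 ⊢; exact hpm2
        rwa [this] at hpm
      rw [hs] at this
      simp at this
    | cons c tail =>
      have hAdef : primary_key_py b po = c := by
        simp only [primary_key_py, if_neg hbne, hM]
        rw [← hcanddef, hfh, hs]
      have hcmem : c ∈ cand := by
        have : c ∈ PySem.List.sorted cand (fun x => x) false := by rw [hs]; simp
        rwa [PySem.List.mem_sorted] at this
      have hle : ∀ y ∈ cand, c ≤ y := PySem.List.key_head_sorted_le cand (fun x => x) hs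
      have hnone := pvFirstHit_none hfh
      have hidx : ∀ y ∈ cand, pvIdxD po y = po.length := by
        intro y hy
        have hyp : y ∉ po := fun hyp => hnone y hyp hy
        have hidxnone : PySem.List.index? po y = none := (PySem.List.index?_eq_none_iff po y).mpr hyp
        simp only [pvIdxD]
        rw [hidxnone]
        rfl
      have hcmin : ∀ y ∈ cand, pvRankLt (r y) (r c) = false := by
        intro y hy
        rw [hrank y M ((hcand y).mp hy), hrank c M ((hcand c).mp hcmem)]
        have e1 := hidx y hy
        have e2 := hidx c hcmem
        have h3 := hle y hy
        simp only [pvRankLt]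
        simp
        refine ⟨by omega, fun _ => ?_⟩
        exact String.le_iff_toList_le.mp h3
      have hAmin := hext c hcmem hcmin
      have e1 : pvRankLt (r c) (r mB) = false := hBmin c (hcsub c hcmem)
      have e2 : pvRankLt (r mB) (r c) = false := hAmin mB hBmem
      have : r c = r mB := pvRankLt_conn e1 e2
      have : c = mB := by
        have h3 := congrArg (fun t => t.2.2) this
        simpa [hr, pvRank] using h3
      rw [hAdef, haltdef]; exact this
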